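-- pv_equiv track=rewrite | github.com/manish17salian/Programming | Recursion/GoodNumbers.py | goodWithoutDigit
-- ===== SOURCE A (Python) =====
-- def goodWithoutDigit(n: int, digit: int) -> bool:
--     # Check if the last digit of 'n' is equal to 'digit'.
--     if n % 10 == digit:
--         return False
--
--     # Calculate the sum of digits and compare it with the last digit of 'n'.
--     total_sum = n % 10
--     n = n // 10
--
--     while n > 0:
--         # If any digit is equal to 'digit' or less than or equal to the total sum,
--         # the number is not considered "good".
--         if n % 10 == digit or n % 10 <= total_sum:
--             return False
--
--         # Update the total sum by adding the current digit.
--         total_sum += n % 10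
--         n = n // 10
--
--     return True
-- ===== SOURCE B (Python) =====
-- def goodWithoutDigit(n: int, digit: int) -> bool:
--     # Extract the digits of n (low to high) exactly as A inspects them.
--     digits = [n % 10]
--     n //= 10
--     while n > 0:
--         digits.append(n % 10)
--         n //= 10
--     # sums[i] = digits[0] + ... + digits[i]
--     sums = []
--     s = 0
--     for d in digits:
--         s += d
--         sums.append(s)
--     # good iff no inspected digit equals 'digit' and each higher digit
--     # strictly exceeds the sum of all digits below it.
--     return all(d != digit for d in digits) and all(d > s for d, s in zip(digits[1:], sums))
-- ===== Notes on version B (the rewrite author's own statement) =====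
-- stated objective: alternative
-- what changed: A's single short-circuiting while loop with a running total is replaced by first materialising the digit list and its running sums, then combining two all(...) checks (no digit equals 'digit'; each higher digit exceeds the sum of the digits below it).
import Mathlib
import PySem

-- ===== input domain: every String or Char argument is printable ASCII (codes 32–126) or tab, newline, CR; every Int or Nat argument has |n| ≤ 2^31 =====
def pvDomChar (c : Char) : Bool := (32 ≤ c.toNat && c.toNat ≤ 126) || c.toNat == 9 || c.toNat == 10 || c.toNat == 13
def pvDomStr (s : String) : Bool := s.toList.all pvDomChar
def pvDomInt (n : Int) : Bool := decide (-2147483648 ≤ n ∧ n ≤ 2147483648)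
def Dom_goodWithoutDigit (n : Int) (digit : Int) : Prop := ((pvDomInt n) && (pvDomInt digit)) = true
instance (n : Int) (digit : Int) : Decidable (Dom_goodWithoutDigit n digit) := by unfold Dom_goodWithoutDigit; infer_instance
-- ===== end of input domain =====

-- B re-decomposes A's short-circuiting while loop into: extract the digit list once,
-- compute its running sums, and combine two all(...) checks (alternative; same cost).

-- ===== PORT A =====
-- the 'while n > 0' loop of A, carrying total_sum; the Nat argument is pure fuel
-- (set to n.toNat + 1 at the call, enough for every iteration since n strictly shrinks)
def goodWithoutDigitLoop (digit : Int) : Nat → Int → Int → Bool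
  | 0, _, _ => true
  | fuel + 1, n, totalSum =>
    if 0 < n then
      if PySem.Int.mod n 10 == digit || PySem.Int.mod n 10 ≤ totalSum then false
      else goodWithoutDigitLoop digit fuel (PySem.Int.floordiv n 10) (totalSum + PySem.Int.mod n 10)
    else true

def goodWithoutDigit (n : Int) (digit : Int) : Bool :=
  if PySem.Int.mod n 10 == digit then false
  else goodWithoutDigitLoop digit (n.toNat + 1) (PySem.Int.floordiv n 10) (PySem.Int.mod n 10)

-- ===== PORT B =====
-- digits appended by Source B's 'while n > 0' collection loop (after the first digit);
-- the Nat argument is pure fuel, set to n.toNat + 1 at the call (enough: n strictly shrinks)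
def collectDigits : Nat → Int → List Int
  | 0, _ => []
  | fuel + 1, n =>
    if 0 < n then PySem.Int.mod n 10 :: collectDigits fuel (PySem.Int.floordiv n 10) else []

def goodWithoutDigit_alt (n : Int) (digit : Int) : Bool :=
  let digits := PySem.Int.mod n 10 :: collectDigits (n.toNat + 1) (PySem.Int.floordiv n 10)
  -- running-sum loop: sums[i] = digits[0] + ... + digits[i]
  let sums := (digits.foldl (fun st d => (st.1 ++ [st.2 + d], st.2 + d))
                (([] : List Int), (0 : Int))).1
  -- digits[1:] ported as .drop 1 (exact: slice from a nonnegative index)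
  (digits.all (fun d => d != digit)) &&
    ((digits.drop 1).zip sums).all (fun p => decide (p.2 < p.1))

-- ===== PRECONDITION & SPEC =====
def Spec_goodWithoutDigit (n : Int) (digit : Int) (out : Bool) : Prop := out = goodWithoutDigit_alt n digit
instance (n : Int) (digit : Int) (out : Bool) : Decidable (Spec_goodWithoutDigit n digit out) := by unfold Spec_goodWithoutDigit; infer_instance

-- ===== CLAIM (what is proved, stated in full; the proofs are below) =====
def Claim_equal_goodWithoutDigit : Prop := ∀ (n : Int) (digit : Int), Dom_goodWithoutDigit n digit → Spec_goodWithoutDigit n digit (goodWithoutDigit n digit)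

-- ===== LEMMAS AND PROOFS =====

-- abstract form of A's loop over an explicit digit list
def goChk (digit : Int) : List Int → Int → Bool
  | [], _ => true
  | d :: ds, s => if d == digit || d ≤ s then false else goChk digit ds (s + d)

-- running sums starting from s
def scanSums (s : Int) : List Int → List Int
  | [] => []
  | d :: ds => (s + d) :: scanSums (s + d) ds

theorem loop_eq_goChk (digit : Int) : ∀ (fuel : Nat) (n s : Int),
    goodWithoutDigitLoop digit fuel n s = goChk digit (collectDigits fuel n) s := by
  intro fuel
  induction fuel with
  | zero => intro n s; simp [goodWithoutDigitLoop, collectDigits, goChk]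
  | succ fuel ih =>
      intro n s
      by_cases h : 0 < n
      · simp [goodWithoutDigitLoop, collectDigits, h, goChk, ih]
      · simp [goodWithoutDigitLoop, collectDigits, h, goChk]

theorem foldl_sums (ds : List Int) : ∀ (acc : List Int) (s : Int),
    (ds.foldl (fun st d => (st.1 ++ [st.2 + d], st.2 + d)) (acc, s)).1 = acc ++ scanSums s ds := by
  induction ds with
  | nil => intro acc s; simp [scanSums]
  | cons d ds ih => intro acc s; simp [List.foldl, scanSums, ih]

theorem goChk_eq_alls (digit : Int) (ds : List Int) : ∀ (s : Int),
    goChk digit ds s =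
      ((ds.all (fun d => d != digit)) &&
        (ds.zip (s :: scanSums s ds)).all (fun p => decide (p.2 < p.1))) := by
  induction ds with
  | nil => intro s; simp [goChk]
  | cons d ds ih =>
      intro s
      simp only [goChk, scanSums, List.zip_cons_cons, List.all_cons, ih (s + d)]
      by_cases h1 : d = digit
      · simp [h1]
      · by_cases h2 : d ≤ s
        · simp [h2, show ¬ s < d by omega]
        · have hne : (d != digit) = true := by simp [h1]
          simp [hne, h2, show s < d by omega]
          intro _ _
          exact h1

-- ===== VERDICT (by name: the statement is the Claim_ definition above) =====
theorem goodWithoutDigit_spec : Claim_equal_goodWithoutDigit := by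
  intro n digit _
  unfold Spec_goodWithoutDigit
  simp only [goodWithoutDigit, goodWithoutDigit_alt, loop_eq_goChk, foldl_sums,
    List.nil_append, scanSums, List.drop_succ_cons, List.drop_zero, List.all_cons, Int.zero_add,
    goChk_eq_alls]
  by_cases h : PySem.Int.mod n 10 = digit
  · have h' : (n % 10 : Int) = digit := by
      rw [← PySem.Int.mod_eq_emod_of_pos (by omega : (0:Int) < 10)]; exact h
    simp [h']
  · have h' : ¬ (n % 10 : Int) = digit := by
      rw [← PySem.Int.mod_eq_emod_of_pos (by omega : (0:Int) < 10)]; exact h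
    simp [h', Bool.and_assoc]
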